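-- pv_equiv track=rewrite | github.com/ruduran/advent_of_code | 2017/python/src/aoc/day06/__init__.py | reallocate
-- ===== SOURCE A (Python) =====
-- def reallocate(bank_list, index_to_reallocate):
--     blocks = bank_list[index_to_reallocate]
--     bank_list[index_to_reallocate] = 0
--     block_num = len(bank_list)
--     blocks_per_bank = int(blocks / block_num)
--     blocks_with_extra = blocks % block_num
--     for i in range(block_num):
--         index = i + index_to_reallocate + 1
--         if index >= block_num:
--             index -= block_num
--
--         bank_list[index] += blocks_per_bank
--         if i < blocks_with_extra:
--             bank_list[index] += 1
--
--     return bank_list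
-- ===== SOURCE B (Python) =====
-- def reallocate(bank_list, index_to_reallocate):
--     n = len(bank_list)
--     blocks = bank_list[index_to_reallocate]
--     bank_list[index_to_reallocate] = 0
--     q, r = divmod(blocks, n)
--     for j in range(n):
--         bank_list[j] += q
--     pos = index_to_reallocate
--     for _ in range(r):
--         pos = (pos + 1) % n
--         bank_list[pos] += 1
--     return bank_list
-- ===== Notes on version B (the rewrite author's own statement) =====
-- stated objective: alternative
-- what changed: A distributes in one pass over bank offsets, giving each bank the quotient plus a conditional extra block with a manual wrap fix-up; B instead adds the divmod quotient to every bank in a bulk sweep and then walks a pointer around the list handing out the remainder one block at a time.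
-- outside the precondition, e.g. on reallocate([-3, 0], 0): A returns [-1, 0], B returns [-2, -1]
import Mathlib
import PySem

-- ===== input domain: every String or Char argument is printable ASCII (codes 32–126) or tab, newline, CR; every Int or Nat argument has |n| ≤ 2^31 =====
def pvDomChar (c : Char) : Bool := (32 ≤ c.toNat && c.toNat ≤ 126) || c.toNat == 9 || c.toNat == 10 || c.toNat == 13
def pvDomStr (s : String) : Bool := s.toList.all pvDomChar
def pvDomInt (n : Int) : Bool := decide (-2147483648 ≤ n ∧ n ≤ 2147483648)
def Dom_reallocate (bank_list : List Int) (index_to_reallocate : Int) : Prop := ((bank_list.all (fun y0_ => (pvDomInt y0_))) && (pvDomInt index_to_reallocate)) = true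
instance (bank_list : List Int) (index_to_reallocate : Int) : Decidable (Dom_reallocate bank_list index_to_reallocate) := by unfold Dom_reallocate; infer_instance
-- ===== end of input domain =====

-- B replaces A's single offset-loop (divide once, conditional "+1", manual wrap fix-up) with a
-- two-phase scheme: add the quotient to every bank in one sweep, then walk a pointer distributing
-- the remainder one block at a time ("alternative" objective; in Python both mutate the argument
-- list in place and return it — the equivalence proved here is about the returned value).

-- ===== PORT A =====
-- loop body of A's for-loop, named so the lemmas below can refer to it
def pvStepA (block_num idx blocks_per_bank blocks_with_extra : Int) (l : List Int) (i : Int) : List Int :=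
  let index := i + idx + 1
  let index := if index ≥ block_num then index - block_num else index
  let l := PySem.List.pySetD l index (PySem.List.pyGetD l index 0 + blocks_per_bank)
  if i < blocks_with_extra then
    PySem.List.pySetD l index (PySem.List.pyGetD l index 0 + 1)
  else l

def reallocate (bank_list : List Int) (index_to_reallocate : Int) : List Int :=
  match PySem.List.pyGet? bank_list index_to_reallocate with
  | none => bank_list   -- Python raises IndexError here; excluded by Pre_
  | some blocks =>
    let bl := PySem.List.pySetD bank_list index_to_reallocate 0
    let block_num : Int := bl.length
    -- int(blocks / block_num): float division then truncation; exact as Int.tdiv for |blocks| ≤ 2^31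
    let blocks_per_bank : Int := blocks.tdiv block_num
    let blocks_with_extra : Int := PySem.Int.mod blocks block_num
    (PySem.List.pyRange 0 block_num 1).foldl
      (pvStepA block_num index_to_reallocate blocks_per_bank blocks_with_extra) bl

-- ===== PORT B =====
-- loop bodies of B's two for-loops
def pvStepB1 (q : Int) (l : List Int) (j : Int) : List Int :=
  PySem.List.pySetD l j (PySem.List.pyGetD l j 0 + q)

def pvStepB2 (n : Int) (st : List Int × Int) (_ : Int) : List Int × Int :=
  let pos := PySem.Int.mod (st.2 + 1) n
  (PySem.List.pySetD st.1 pos (PySem.List.pyGetD st.1 pos 0 + 1), pos)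

def reallocate_alt (bank_list : List Int) (index_to_reallocate : Int) : List Int :=
  let n : Int := bank_list.length
  match PySem.List.pyGet? bank_list index_to_reallocate with
  | none => bank_list   -- Python raises IndexError here; excluded by Pre_
  | some blocks =>
    let bl := PySem.List.pySetD bank_list index_to_reallocate 0
    let q : Int := PySem.Int.floordiv blocks n
    let r : Int := PySem.Int.mod blocks n
    let bl := (PySem.List.pyRange 0 n 1).foldl (pvStepB1 q) bl
    let st := (PySem.List.pyRange 0 r 1).foldl (pvStepB2 n) (bl, index_to_reallocate)
    st.1

-- ===== PRECONDITION & SPEC =====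
-- Pre_ excludes out-of-range indices (A raises IndexError) and negative block counts at the
-- reallocated bank: a negative bank is outside the puzzle's natural domain, and there A's
-- truncating float division mixed with floor-mod returns a value B's divmod arithmetic does not match.
def Pre_reallocate (bank_list : List Int) (index_to_reallocate : Int) : Prop :=
  PySem.Raise.InRange bank_list.length index_to_reallocate ∧
  0 ≤ PySem.List.pyGetD bank_list index_to_reallocate 0
instance (bank_list : List Int) (index_to_reallocate : Int) : Decidable (Pre_reallocate bank_list index_to_reallocate) := by
  unfold Pre_reallocate; infer_instance

def pvWitness_reallocate : List Int × Int := ([0, 2, 7], 2)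

def Spec_reallocate (bank_list : List Int) (index_to_reallocate : Int) (out : List Int) : Prop := out = reallocate_alt bank_list index_to_reallocate
instance (bank_list : List Int) (index_to_reallocate : Int) (out : List Int) : Decidable (Spec_reallocate bank_list index_to_reallocate out) := by unfold Spec_reallocate; infer_instance

-- ===== CLAIM (what is proved, stated in full; the proofs are below) =====
def Claim_equal_reallocate : Prop := ∀ (bank_list : List Int) (index_to_reallocate : Int), Dom_reallocate bank_list index_to_reallocate → Pre_reallocate bank_list index_to_reallocate → Spec_reallocate bank_list index_to_reallocate (reallocate bank_list index_to_reallocate)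

-- ===== LEMMAS AND PROOFS =====

theorem pv_pyIdx?_eq (n : Nat) (i : Int) (h : PySem.Raise.InRange n i) :
    PySem.List.pyIdx? n i = some ((i % (n : Int)).toNat) := by
  obtain ⟨h1, h2⟩ := h
  have hmod : i % (n : Int) = if 0 ≤ i then i else i + n := by
    split_ifs with h0
    · exact Int.emod_eq_of_lt h0 h2
    · have e1 : ((i + n) % (n : Int)) = i + n := Int.emod_eq_of_lt (by omega) (by omega)
      have e2 : (i + (n : Int) * 1) % n = i % n := Int.add_mul_emod_self_left i n 1
      rw [mul_one] at e2
      rw [← e2, e1]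
  simp only [PySem.List.pyIdx?]
  split_ifs with h3 _ <;> simp only [Option.some.injEq] <;> rw [hmod] <;> simp [h3] <;> omega

theorem pv_pySetD_eq {α : Type} (l : List α) (i : Int) (v : α)
    (h : PySem.Raise.InRange l.length i) :
    PySem.List.pySetD l i v = l.set ((i % (l.length : Int)).toNat) v := by
  simp [PySem.List.pySetD, PySem.List.pySet?, pv_pyIdx?_eq _ _ h]

theorem pv_pyGetD_eq {α : Type} (l : List α) (i : Int) (d : α)
    (h : PySem.Raise.InRange l.length i) :
    PySem.List.pyGetD l i d = l.getD ((i % (l.length : Int)).toNat) d := by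
  simp [PySem.List.pyGetD, PySem.List.pyGet?, pv_pyIdx?_eq _ _ h, List.getD]

-- "add v at position p" — the common shape of every write both loops perform
def pvWrite (l : List Int) (p : Nat) (v : Int) : List Int := l.set p (l.getD p 0 + v)

theorem pvWrite_length (l : List Int) (p : Nat) (v : Int) : (pvWrite l p v).length = l.length := by
  simp [pvWrite]

theorem pvWrite_getD (l : List Int) (p j : Nat) (v : Int) (hp : p < l.length) (hj : j < l.length) :
    (pvWrite l p v).getD j 0 = l.getD j 0 + if j = p then v else 0 := by
  have hj' : j < (pvWrite l p v).length := by simpa [pvWrite_length] using hj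
  rw [List.getD_eq_getElem _ _ hj', List.getD_eq_getElem _ _ hj]
  simp only [pvWrite, List.getElem_set]
  split_ifs with h1 h2 h2
  · subst h1; rw [List.getD_eq_getElem _ _ hp]
  · omega
  · omega
  · simp

theorem pvWrite_pvWrite (l : List Int) (p : Nat) (a b : Int) (hp : p < l.length) :
    pvWrite (pvWrite l p a) p b = pvWrite l p (a + b) := by
  have h1 : (pvWrite l p a).getD p 0 = l.getD p 0 + a := by
    simpa using pvWrite_getD l p p a hp hp
  show (pvWrite l p a).set p ((pvWrite l p a).getD p 0 + b) = _
  rw [h1, pvWrite, pvWrite, List.set_set]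
  ring_nf

theorem pv_emod_sub (x n : Int) : (x - n) % n = x % n := by
  have h := Int.add_mul_emod_self_left x n (-1)
  rw [show x + n * (-1) = x - n by ring] at h
  exact h

theorem pv_emod_shift (x c n : Int) : (x % n + c) % n = (x + c) % n := by
  have hx : x % n = x - n * (x / n) := Int.emod_def x n
  rw [hx, show x - n * (x / n) + c = (x + c) + n * (-(x / n)) by ring,
    Int.add_mul_emod_self_left]

-- `rank j = (j - idx - 1) mod n` is the loop step at which bank j receives its block
theorem pv_rank_eq (n : Nat) (_hn : 0 < n) (idx : Int) (m j : Nat) (hm : m < n) (hj : j < n) :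
    (((j : Int) - idx - 1) % (n : Int) = (m : Int)) ↔ ((j : Int) = ((m : Int) + idx + 1) % (n : Int)) := by
  have hjj : ((j : Int)) % (n : Int) = (j : Int) :=
    Int.emod_eq_of_lt (by positivity) (by exact_mod_cast hj)
  have hmm : ((m : Int)) % (n : Int) = (m : Int) :=
    Int.emod_eq_of_lt (by positivity) (by exact_mod_cast hm)
  constructor
  · intro h
    have hd : ((j : Int) - idx - 1) % (n : Int) = ((j : Int) - idx - 1) - n * (((j : Int) - idx - 1) / n) :=
      Int.emod_def _ _
    have hmj : (m : Int) + idx + 1 = (j : Int) + (n : Int) * (-(((j : Int) - idx - 1) / n)) := by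
      rw [← h, hd]; ring
    rw [hmj, Int.add_mul_emod_self_left, hjj]
  · intro h
    have hd : ((m : Int) + idx + 1) % (n : Int) = ((m : Int) + idx + 1) - n * (((m : Int) + idx + 1) / n) :=
      Int.emod_def _ _
    have hj2 : (j : Int) - idx - 1 = (m : Int) + (n : Int) * (-(((m : Int) + idx + 1) / n)) := by
      rw [h, hd]; ring
    rw [hj2, Int.add_mul_emod_self_left, hmm]

theorem pv_stepA_eq (n : Nat) (hn : 0 < n) (idx q r : Int) (hidx : PySem.Raise.InRange n idx)
    (l : List Int) (hl : l.length = n) (i : Int) (hi0 : 0 ≤ i) (hin : i < n) :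
    pvStepA n idx q r l i = pvWrite l (((i + idx + 1) % (n : Int)).toNat) (q + if i < r then 1 else 0) := by
  obtain ⟨hx1, hx2⟩ := hidx
  unfold pvStepA
  dsimp only []
  set t := if i + idx + 1 ≥ (n : Int) then i + idx + 1 - n else i + idx + 1 with ht
  have htb : -(n : Int) ≤ t ∧ t < n := by
    rw [ht]; split_ifs <;> omega
  have htr : PySem.Raise.InRange l.length t := by rw [hl]; exact htb
  have hte : t % (n : Int) = (i + idx + 1) % (n : Int) := by
    rw [ht]; split_ifs
    · exact pv_emod_sub _ _
    · rfl
  have hpb : 0 ≤ (i + idx + 1) % (n : Int) ∧ (i + idx + 1) % (n : Int) < n :=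
    ⟨Int.emod_nonneg _ (by positivity), Int.emod_lt_of_pos _ (by positivity)⟩
  have hpn : ((i + idx + 1) % (n : Int)).toNat < l.length := by rw [hl]; omega
  have hw1 : PySem.List.pySetD l t (PySem.List.pyGetD l t 0 + q) =
      pvWrite l (((i + idx + 1) % (n : Int)).toNat) q := by
    rw [pv_pySetD_eq _ _ _ htr, pv_pyGetD_eq _ _ _ htr, hl, hte]
    rfl
  rw [hw1]
  have htr2 : PySem.Raise.InRange (pvWrite l (((i + idx + 1) % (n : Int)).toNat) q).length t := by
    rw [pvWrite_length, hl]; exact htb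
  split_ifs with hir
  · rw [pv_pySetD_eq _ _ _ htr2, pv_pyGetD_eq _ _ _ htr2, pvWrite_length, hl, hte]
    exact pvWrite_pvWrite l _ q 1 hpn
  · rw [add_zero]

theorem pv_A_loop (n : Nat) (hn : 0 < n) (idx q r : Int) (hidx : PySem.Raise.InRange n idx)
    (base : List Int) (hbase : base.length = n) (m : Nat) (hm : m ≤ n) :
    ((PySem.List.pyRange 0 (m : Int) 1).foldl (pvStepA n idx q r) base).length = n ∧
    ∀ j : Nat, j < n →
      ((PySem.List.pyRange 0 (m : Int) 1).foldl (pvStepA n idx q r) base).getD j 0 =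
        base.getD j 0 +
          (if ((j : Int) - idx - 1) % (n : Int) < (m : Int) then
             q + (if ((j : Int) - idx - 1) % (n : Int) < r then 1 else 0) else 0) := by
  induction m with
  | zero =>
    constructor
    · simp [PySem.List.pyRange_one_eq_nil (le_refl (0 : Int)), hbase]
    · intro j hj
      have hnn : ¬ (((j : Int) - idx - 1) % (n : Int) < (0 : Int)) := by
        have := Int.emod_nonneg ((j : Int) - idx - 1) (show (n : Int) ≠ 0 by positivity)
        omega
      simp [PySem.List.pyRange_one_eq_nil (le_refl (0 : Int)), hnn]
  | succ m ih =>
    obtain ⟨ihlen, ihget⟩ := ih (by omega)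
    have hcast : (((m + 1 : Nat)) : Int) = (m : Int) + 1 := by push_cast; ring
    have hsplit : PySem.List.pyRange 0 ((m + 1 : Nat) : Int) 1 =
        PySem.List.pyRange 0 (m : Int) 1 ++ [(m : Int)] := by
      rw [hcast, PySem.List.pyRange_one_succ_right (by positivity)]
    rw [hsplit, List.foldl_append]
    set prev := (PySem.List.pyRange 0 (m : Int) 1).foldl (pvStepA n idx q r) base with hprev
    have hstep : pvStepA (n : Nat) idx q r prev (m : Int) =
        pvWrite prev (((m : Int) + idx + 1) % (n : Int)).toNat (q + if (m : Int) < r then 1 else 0) :=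
      pv_stepA_eq n hn idx q r hidx prev ihlen (m : Int) (by positivity) (by exact_mod_cast hm)
    simp only [List.foldl_cons, List.foldl_nil, hstep]
    have hpb : 0 ≤ ((m : Int) + idx + 1) % (n : Int) ∧ ((m : Int) + idx + 1) % (n : Int) < n :=
      ⟨Int.emod_nonneg _ (by positivity), Int.emod_lt_of_pos _ (by positivity)⟩
    constructor
    · rw [pvWrite_length, ihlen]
    · intro j hj
      have hrank := pv_rank_eq n hn idx m j (by omega) hj
      have hrb : 0 ≤ ((j : Int) - idx - 1) % (n : Int) ∧ ((j : Int) - idx - 1) % (n : Int) < n :=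
        ⟨Int.emod_nonneg _ (by positivity), Int.emod_lt_of_pos _ (by positivity)⟩
      rw [pvWrite_getD prev _ j _ (by omega) (by omega), ihget j hj, hcast]
      split_ifs <;> omega

theorem pv_stepB1_eq (n : Nat) (q : Int) (l : List Int) (hl : l.length = n)
    (j : Int) (hj0 : 0 ≤ j) (hjn : j < n) :
    pvStepB1 q l j = pvWrite l j.toNat q := by
  have hr : PySem.Raise.InRange l.length j := by rw [hl]; exact ⟨by omega, hjn⟩
  have he : j % (n : Int) = j := Int.emod_eq_of_lt hj0 hjn
  unfold pvStepB1
  rw [pv_pySetD_eq _ _ _ hr, pv_pyGetD_eq _ _ _ hr, hl, he]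
  rfl

theorem pv_B_loop1 (n : Nat) (q : Int) (base : List Int) (hbase : base.length = n)
    (m : Nat) (hm : m ≤ n) :
    ((PySem.List.pyRange 0 (m : Int) 1).foldl (pvStepB1 q) base).length = n ∧
    ∀ j : Nat, j < n →
      ((PySem.List.pyRange 0 (m : Int) 1).foldl (pvStepB1 q) base).getD j 0 =
        base.getD j 0 + (if (j : Int) < (m : Int) then q else 0) := by
  induction m with
  | zero =>
    constructor
    · simp [PySem.List.pyRange_one_eq_nil (le_refl (0 : Int)), hbase]
    · intro j hj
      simp [PySem.List.pyRange_one_eq_nil (le_refl (0 : Int))]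
  | succ m ih =>
    obtain ⟨ihlen, ihget⟩ := ih (by omega)
    have hcast : (((m + 1 : Nat)) : Int) = (m : Int) + 1 := by push_cast; ring
    have hsplit : PySem.List.pyRange 0 ((m + 1 : Nat) : Int) 1 =
        PySem.List.pyRange 0 (m : Int) 1 ++ [(m : Int)] := by
      rw [hcast, PySem.List.pyRange_one_succ_right (by positivity)]
    rw [hsplit, List.foldl_append]
    set prev := (PySem.List.pyRange 0 (m : Int) 1).foldl (pvStepB1 q) base with hprev
    have hstep : pvStepB1 q prev (m : Int) = pvWrite prev m q := by
      have h := pv_stepB1_eq n q prev ihlen (m : Int) (by positivity) (by exact_mod_cast hm)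
      simpa using h
    simp only [List.foldl_cons, List.foldl_nil, hstep]
    constructor
    · rw [pvWrite_length, ihlen]
    · intro j hj
      rw [pvWrite_getD prev m j _ (by omega) (by omega), ihget j hj, hcast]
      split_ifs <;> omega

theorem pv_B_loop2 (n : Nat) (hn : 0 < n) (idx r : Int) (base : List Int)
    (hbase : base.length = n) (m : Nat) (hm : (m : Int) ≤ r) (hr : r ≤ n) :
    ((PySem.List.pyRange 0 (m : Int) 1).foldl (pvStepB2 n) (base, idx)).1.length = n ∧
    (((PySem.List.pyRange 0 (m : Int) 1).foldl (pvStepB2 n) (base, idx)).2 + 1) % (n : Int)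
      = (idx + m + 1) % (n : Int) ∧
    ∀ j : Nat, j < n →
      ((PySem.List.pyRange 0 (m : Int) 1).foldl (pvStepB2 n) (base, idx)).1.getD j 0 =
        base.getD j 0 + (if ((j : Int) - idx - 1) % (n : Int) < (m : Int) then 1 else 0) := by
  induction m with
  | zero =>
    refine ⟨by simp [PySem.List.pyRange_one_eq_nil (le_refl (0 : Int)), hbase], ?_, ?_⟩
    · simp [PySem.List.pyRange_one_eq_nil (le_refl (0 : Int))]
    · intro j hj
      have hnn : ¬ (((j : Int) - idx - 1) % (n : Int) < (0 : Int)) := by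
        have := Int.emod_nonneg ((j : Int) - idx - 1) (show (n : Int) ≠ 0 by positivity)
        omega
      simp [PySem.List.pyRange_one_eq_nil (le_refl (0 : Int)), hnn]
  | succ m ih =>
    obtain ⟨ihlen, ihpos, ihget⟩ := ih (by push_cast at hm ⊢; omega)
    have hcast : (((m + 1 : Nat)) : Int) = (m : Int) + 1 := by push_cast; ring
    have hsplit : PySem.List.pyRange 0 ((m + 1 : Nat) : Int) 1 =
        PySem.List.pyRange 0 (m : Int) 1 ++ [(m : Int)] := by
      rw [hcast, PySem.List.pyRange_one_succ_right (by positivity)]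
    rw [hsplit, List.foldl_append]
    set prev := (PySem.List.pyRange 0 (m : Int) 1).foldl (pvStepB2 n) (base, idx) with hprev
    have hpb : 0 ≤ ((m : Int) + idx + 1) % (n : Int) ∧ ((m : Int) + idx + 1) % (n : Int) < n :=
      ⟨Int.emod_nonneg _ (by positivity), Int.emod_lt_of_pos _ (by positivity)⟩
    have hposval : PySem.Int.mod (prev.2 + 1) (n : Int) = ((m : Int) + idx + 1) % (n : Int) := by
      rw [PySem.Int.mod_eq_emod_of_pos (by positivity), ihpos]
      congr 1
      ring
    have hrange : PySem.Raise.InRange prev.1.length (PySem.Int.mod (prev.2 + 1) (n : Int)) := by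
      rw [ihlen, hposval]
      exact ⟨by omega, by omega⟩
    have hstep : pvStepB2 (n : Int) prev (m : Int) =
        (pvWrite prev.1 (((m : Int) + idx + 1) % (n : Int)).toNat 1, ((m : Int) + idx + 1) % (n : Int)) := by
      unfold pvStepB2
      dsimp only []
      rw [pv_pySetD_eq _ _ _ hrange, pv_pyGetD_eq _ _ _ hrange, ihlen, hposval,
        Int.emod_emod_of_dvd _ (dvd_refl ((n : Nat) : Int))]
      rfl
    simp only [List.foldl_cons, List.foldl_nil, hstep]
    refine ⟨by rw [pvWrite_length, ihlen], ?_, ?_⟩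
    · rw [pv_emod_shift, hcast]
      congr 1
      ring
    · intro j hj
      have hrank := pv_rank_eq n hn idx m j (by omega) hj
      have hrb : 0 ≤ ((j : Int) - idx - 1) % (n : Int) ∧ ((j : Int) - idx - 1) % (n : Int) < n :=
        ⟨Int.emod_nonneg _ (by positivity), Int.emod_lt_of_pos _ (by positivity)⟩
      rw [pvWrite_getD prev.1 _ j _ (by omega) (by omega), ihget j hj, hcast]
      split_ifs <;> omega

theorem pv_main (bl : List Int) (idx : Int) (hin : PySem.Raise.InRange bl.length idx)
    (hpos : 0 ≤ PySem.List.pyGetD bl idx 0) :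
    reallocate bl idx = reallocate_alt bl idx := by
  have hn : 0 < bl.length := by
    obtain ⟨h1, h2⟩ := hin; omega
  have hnz : ((bl.length : Int)) ≠ 0 := by positivity
  have hnp : (0 : Int) < (bl.length : Int) := by positivity
  have hkb : 0 ≤ idx % (bl.length : Int) ∧ idx % (bl.length : Int) < (bl.length : Int) :=
    ⟨Int.emod_nonneg _ hnz, Int.emod_lt_of_pos _ hnp⟩
  have hpn : ((idx % (bl.length : Int)).toNat) < bl.length := by omega
  have hk := pv_pyIdx?_eq bl.length idx hin
  have hget : PySem.List.pyGet? bl idx = some (bl.getD ((idx % (bl.length : Int)).toNat) 0) := by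
    simp only [PySem.List.pyGet?]
    rw [hk]
    simp [List.getElem?_eq_getElem hpn]
  have hblocks : 0 ≤ bl.getD ((idx % (bl.length : Int)).toNat) 0 := by
    rw [pv_pyGetD_eq _ _ _ hin] at hpos
    exact hpos
  have hlen : (PySem.List.pySetD bl idx 0).length = bl.length := by
    rw [pv_pySetD_eq _ _ _ hin]; simp
  have hq : (bl.getD ((idx % (bl.length : Int)).toNat) 0).tdiv (bl.length : Int)
      = PySem.Int.floordiv (bl.getD ((idx % (bl.length : Int)).toNat) 0) (bl.length : Int) := by
    rw [PySem.Int.floordiv_eq_ediv_of_pos hnp, Int.tdiv_eq_ediv, if_pos (Or.inl hblocks), add_zero]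
  have hr0 : 0 ≤ PySem.Int.mod (bl.getD ((idx % (bl.length : Int)).toNat) 0) (bl.length : Int) :=
    PySem.Int.mod_nonneg _ hnp
  have hrlt : PySem.Int.mod (bl.getD ((idx % (bl.length : Int)).toNat) 0) (bl.length : Int) < (bl.length : Int) :=
    PySem.Int.mod_lt _ hnp
  have hA : reallocate bl idx =
      (PySem.List.pyRange 0 ((bl.length : Nat) : Int) 1).foldl
        (pvStepA ((bl.length : Nat) : Int) idx
          (PySem.Int.floordiv (bl.getD ((idx % (bl.length : Int)).toNat) 0) (bl.length : Int))
          (PySem.Int.mod (bl.getD ((idx % (bl.length : Int)).toNat) 0) (bl.length : Int)))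
        (PySem.List.pySetD bl idx 0) := by
    unfold reallocate
    rw [hget]
    dsimp only []
    rw [hlen, hq]
  have hB : reallocate_alt bl idx =
      ((PySem.List.pyRange 0
          (PySem.Int.mod (bl.getD ((idx % (bl.length : Int)).toNat) 0) (bl.length : Int)) 1).foldl
        (pvStepB2 ((bl.length : Nat) : Int))
        (((PySem.List.pyRange 0 ((bl.length : Nat) : Int) 1).foldl
            (pvStepB1 (PySem.Int.floordiv (bl.getD ((idx % (bl.length : Int)).toNat) 0) (bl.length : Int)))
            (PySem.List.pySetD bl idx 0)), idx)).1 := by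
    unfold reallocate_alt
    rw [hget]
  set q := PySem.Int.floordiv (bl.getD ((idx % (bl.length : Int)).toNat) 0) (bl.length : Int) with hqd
  set r := PySem.Int.mod (bl.getD ((idx % (bl.length : Int)).toNat) 0) (bl.length : Int) with hrd
  have hbaselen : (PySem.List.pySetD bl idx 0).length = bl.length := hlen
  obtain ⟨hAlen, hAget⟩ :=
    pv_A_loop bl.length hn idx q r hin (PySem.List.pySetD bl idx 0) hbaselen bl.length (le_refl _)
  obtain ⟨hB1len, hB1get⟩ :=
    pv_B_loop1 bl.length q (PySem.List.pySetD bl idx 0) hbaselen bl.length (le_refl _)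
  have htn : ((r.toNat : Nat) : Int) = r := Int.toNat_of_nonneg hr0
  obtain ⟨hB2len, _, hB2get⟩ :=
    pv_B_loop2 bl.length hn idx r
      ((PySem.List.pyRange 0 ((bl.length : Nat) : Int) 1).foldl (pvStepB1 q)
        (PySem.List.pySetD bl idx 0))
      hB1len r.toNat (by rw [htn]) (le_of_lt hrlt)
  rw [htn] at hB2len hB2get
  rw [hA, hB]
  apply List.ext_getElem (by rw [hAlen, hB2len])
  intro i hi1 hi2
  have hiN : i < bl.length := by rw [hAlen] at hi1; exact hi1
  rw [← List.getD_eq_getElem _ 0 hi1, ← List.getD_eq_getElem _ 0 hi2]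
  rw [hAget i hiN, hB2get i hiN, hB1get i hiN]
  have hrb : 0 ≤ ((i : Int) - idx - 1) % (bl.length : Int) ∧
      ((i : Int) - idx - 1) % (bl.length : Int) < (bl.length : Int) :=
    ⟨Int.emod_nonneg _ hnz, Int.emod_lt_of_pos _ hnp⟩
  have hiI : ((i : Nat) : Int) < (bl.length : Int) := by exact_mod_cast hiN
  split_ifs <;> omega

-- ===== VERDICT (by name: the statement is the Claim_ definition above) =====
theorem reallocate_spec : Claim_equal_reallocate := by
  intro bank_list index_to_reallocate _ hpre
  obtain ⟨hin, hpos⟩ := hpre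
  exact pv_main bank_list index_to_reallocate hin hpos
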